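-- pv_equiv track=rewrite | github.com/triparnabh/Page-Rank-Implementation | PageRank/abstracts/TF_IDF_MRR.py | query_dictionary
-- ===== SOURCE A (Python) =====
-- def query_dictionary(text, query_number):  # calculating frequency of query word and storing in di2 along with query number.
--
--     di2 = {}
--     for word in text:
--         if word not in di2:
--             di2[word] = {}
--         if word in di2:
--             if query_number in di2[word]:
--                 di2[word][query_number] += 1
--             else:
--                 di2[word][query_number] = 1
--     return di2
-- ===== SOURCE B (Python) =====
-- def query_dictionary(text, query_number):
--     # Dedup-then-count: distinct words in first-appearance order, each counted
--     # by its own scan of the list (no incremental tally dict is maintained).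
--     return {word: {query_number: text.count(word)} for word in dict.fromkeys(text)}
-- ===== Notes on version B (the rewrite author's own statement) =====
-- stated objective: alternative
-- what changed: A maintains an incremental nested tally dict, bumping a counter per element in one pass; B never maintains running counts: it first deduplicates the list into the distinct words in first-appearance order and then computes each word's frequency by a separate full scan (list.count), trading O(n) tallying for O(n*k) per-key counting scans.
import Mathlib
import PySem

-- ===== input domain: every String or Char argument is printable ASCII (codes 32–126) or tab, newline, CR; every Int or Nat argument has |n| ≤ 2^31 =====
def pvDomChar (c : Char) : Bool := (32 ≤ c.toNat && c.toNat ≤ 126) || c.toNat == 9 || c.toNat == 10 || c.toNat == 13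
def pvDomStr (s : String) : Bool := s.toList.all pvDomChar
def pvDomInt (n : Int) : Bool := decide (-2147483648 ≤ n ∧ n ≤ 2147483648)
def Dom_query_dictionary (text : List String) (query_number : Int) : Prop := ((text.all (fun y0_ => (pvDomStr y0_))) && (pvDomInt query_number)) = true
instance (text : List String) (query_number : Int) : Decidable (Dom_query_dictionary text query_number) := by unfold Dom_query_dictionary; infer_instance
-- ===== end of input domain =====

-- B replaces A's incremental nested-tally loop with dedup-then-count: distinct words first, then one counting scan per word (alternative algorithm, same results).


-- ===== PORT A =====
-- loop body of A: ensure di2[word] exists, then bump di2[word][query_number]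
def qdStep (query_number : Int) (di2 : PySem.Dict String (PySem.Dict Int Int)) (word : String) :
    PySem.Dict String (PySem.Dict Int Int) :=
  let di2 := if di2.contains word = false then di2.insert word PySem.Dict.empty else di2
  if di2.contains word = true then
    let inner := di2.getD word PySem.Dict.empty
    if inner.contains query_number = true then
      di2.insert word (inner.insert query_number (inner.getD query_number 0 + 1))
    else
      di2.insert word (inner.insert query_number 1)
  else di2

def query_dictionary (text : List String) (query_number : Int) : List (String × List (Int × Int)) :=
  ((text.foldl (qdStep query_number) PySem.Dict.empty).items).map (fun p => (p.1, p.2.items))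

-- ===== PORT B =====
-- dict.fromkeys(text) = distinct words in first-appearance order; text.count(word) = a counting scan
def query_dictionary_alt (text : List String) (query_number : Int) : List (String × List (Int × Int)) :=
  (PySem.Set.ofList text).map (fun word => (word, [(query_number, (text.count word : Int))]))

-- ===== PRECONDITION & SPEC =====
def Spec_query_dictionary (text : List String) (query_number : Int) (out : List (String × List (Int × Int))) : Prop := out = query_dictionary_alt text query_number
instance (text : List String) (query_number : Int) (out : List (String × List (Int × Int))) : Decidable (Spec_query_dictionary text query_number out) := by unfold Spec_query_dictionary; infer_instance

-- ===== CLAIM (what is proved, stated in full; the proofs are below) =====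
def Claim_equal_query_dictionary : Prop := ∀ (text : List String) (query_number : Int), Dom_query_dictionary text query_number → Spec_query_dictionary text query_number (query_dictionary text query_number)

-- ===== LEMMAS AND PROOFS =====

lemma insert_singleton (qn v : Int) (c : Int) :
    (PySem.Dict.mk [(qn, c)] : PySem.Dict Int Int).insert qn v = PySem.Dict.mk [(qn, v)] := by
  apply PySem.Dict.ext
  rw [PySem.Dict.items_insert_of_contains]
  · simp
  · simp

lemma empty_insert (qn v : Int) :
    (PySem.Dict.empty : PySem.Dict Int Int).insert qn v = PySem.Dict.mk [(qn, v)] := by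
  apply PySem.Dict.ext
  rw [PySem.Dict.items_insert_of_not_contains]
  · simp [PySem.Dict.empty]
  · simp

-- characterisation of A's loop state: one entry per distinct word (first-appearance order)
-- whose inner dict is the singleton {qn: count so far}
lemma qdState_items (qn : Int) (l : List String) :
    (l.foldl (qdStep qn) PySem.Dict.empty).items
      = (PySem.Set.ofList l).map (fun w => (w, PySem.Dict.mk [(qn, (l.count w : Int))])) := by
  induction l using List.reverseRecOn with
  | nil => rfl
  | append_singleton l x ih =>
    rw [List.foldl_append, List.foldl_cons, List.foldl_nil]
    set d := l.foldl (qdStep qn) PySem.Dict.empty with hd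
    have hkeys : d.keys = PySem.Set.ofList l := by
      show d.items.map (·.1) = _
      rw [ih]; simp [Function.comp_def]
    have hnd : d.keys.Nodup := by rw [hkeys]; exact PySem.Set.nodup_ofList l
    have hcont : d.contains x = decide (x ∈ l) := by
      rw [PySem.Dict.contains_eq_decide_mem_keys, hkeys]
      simp [PySem.Set.mem_ofList]
    by_cases hx : x ∈ l
    · have hc : d.contains x = true := by simp [hcont, hx]
      have hmem : (x, PySem.Dict.mk [(qn, (l.count x : Int))]) ∈ d.items := by
        rw [ih]
        exact List.mem_map_of_mem ((PySem.Set.mem_ofList l x).mpr hx)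
      have hget : d.getD x PySem.Dict.empty = PySem.Dict.mk [(qn, (l.count x : Int))] :=
        PySem.Dict.getD_of_mem_items d hmem hnd _
      have hinnerc : (PySem.Dict.mk [(qn, (l.count x : Int))]).contains qn = true := by simp
      have hinnerg : (PySem.Dict.mk [(qn, (l.count x : Int))]).getD qn 0 = (l.count x : Int) := by
        rw [PySem.Dict.getD_eq_get?_getD, PySem.Dict.get?_mk_cons]; simp
      unfold qdStep
      simp only [hc, Bool.true_eq_false, reduceIte, hget, hinnerc, hinnerg]
      rw [insert_singleton, PySem.Dict.items_insert_of_contains _ _ hc, ih]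
      have hset : PySem.Set.ofList (l ++ [x]) = PySem.Set.ofList l := by simp [pysem, hx]
      rw [hset, List.map_map]
      apply List.map_congr_left
      intro w hw
      by_cases hwx : w = x
      · subst hwx
        simp [List.count_append]
      · have hxw : x ≠ w := fun h => hwx h.symm
        simp [List.count_append, hxw, hwx]
    · have hc : d.contains x = false := by simp [hcont, hx]
      unfold qdStep
      simp only [hc, reduceIte, PySem.Dict.contains_insert_self, PySem.Dict.getD_insert_self,
        PySem.Dict.contains_empty, Bool.false_eq_true]
      rw [PySem.Dict.insert_insert_self, empty_insert,
          PySem.Dict.items_insert_of_not_contains _ _ hc, ih]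
      have hset : PySem.Set.ofList (l ++ [x]) = PySem.Set.ofList l ++ [x] := by simp [pysem, hx]
      rw [hset, List.map_append]
      congr 1
      · apply List.map_congr_left
        intro w hw
        have hwl : w ∈ l := (PySem.Set.mem_ofList l w).mp hw
        have hwx : w ≠ x := fun h => hx (h ▸ hwl)
        have hxw : x ≠ w := fun h => hwx h.symm
        simp [List.count_append, hxw]
      · simp [List.count_append, List.count_eq_zero_of_not_mem hx]

-- ===== VERDICT (by name: the statement is the Claim_ definition above) =====
theorem query_dictionary_spec : Claim_equal_query_dictionary := by
  intro text qn _
  unfold Spec_query_dictionary query_dictionary query_dictionary_alt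
  rw [qdState_items, List.map_map]
  rfl
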